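-- pv_equiv track=rewrite | github.com/kth990303/BojCodingTestStudy | 15주차/(P)17679/17679_py_joohye.py | check
-- ===== SOURCE A (Python) =====
-- def check(board):
--     axis = []
--     for i in range(len(board)-1) :
--         for j in range(len(board[i])-1):
--             if(board[i][j] != '0' and board[i][j] == board[i][j+1] and board[i][j]==board[i+1][j] and board[i][j]==board[i+1][j+1]):
--                 axis.append([i, j])
--                 axis.append([i, j+1])
--                 axis.append([i+1, j])
--                 axis.append([i+1, j+1])
--     #중복좌표값 제거
--     new_axis = []
--     for (i, j) in axis:
--         if [i, j] not in new_axis: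
--             new_axis.append([i,j])
--     #'0'으로 바꾸기
--     for(i, j) in new_axis:
--         board[i][j] = '0'
--
--
--     return len(new_axis)
-- ===== SOURCE B (Python) =====
-- def check(board):
--     n = len(board)
--
--     def hit(a, b):
--         c = board[a][b]
--         return c != '0' and c == board[a][b + 1] == board[a + 1][b] == board[a + 1][b + 1]
--
--     covered = [(i, j)
--                for i in range(n) for j in range(len(board[i]))
--                if any(hit(a, b)
--                       for a in (i - 1, i) if 0 <= a < n - 1
--                       for b in (j - 1, j) if 0 <= b < len(board[a]) - 1)]
--     for i, j in covered:
--         board[i][j] = '0'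
--     return len(covered)
-- ===== Notes on version B (the rewrite author's own statement) =====
-- stated objective: alternative
-- what changed: B inverts the traversal: instead of scanning 2x2 blocks, collecting their coordinates and deduplicating with a quadratic membership loop, B asks for each single cell whether any of the (up to four) 2x2 blocks containing it matches, building the distinct covered-cell list directly with no intermediate coordinate list and no dedup pass.
-- outside the precondition, e.g. on check([['1', '1'], ['1']]): A raises IndexError, B raises IndexError
import Mathlib
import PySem

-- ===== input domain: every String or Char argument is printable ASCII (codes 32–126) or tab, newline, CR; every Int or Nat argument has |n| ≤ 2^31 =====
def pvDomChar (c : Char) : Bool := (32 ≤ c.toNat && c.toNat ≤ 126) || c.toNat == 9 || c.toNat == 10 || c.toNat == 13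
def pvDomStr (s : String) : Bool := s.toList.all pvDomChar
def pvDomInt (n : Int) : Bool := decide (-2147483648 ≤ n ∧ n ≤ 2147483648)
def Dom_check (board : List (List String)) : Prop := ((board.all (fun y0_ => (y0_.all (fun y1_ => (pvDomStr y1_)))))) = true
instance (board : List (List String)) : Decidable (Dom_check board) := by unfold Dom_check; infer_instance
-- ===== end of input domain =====

-- B inverts the traversal: instead of collecting 2x2-block coordinates and deduplicating with a
-- quadratic membership loop, it asks per cell whether some matching 2x2 block covers it
-- (objective: alternative).  Both Pythons also set the matched cells of `board` to '0' in place
-- (the same cells); the theorems are about the return value.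

-- board[i][j] as a total function (cells are only read at indices that are in range on admitted inputs)
def pvCell (board : List (List String)) (i j : Nat) : String :=
  (board.getD i []).getD j ""

-- the 2x2-block condition shared verbatim by both Pythons (A's `if`, B's `hit`)
def pvHit (board : List (List String)) (i j : Nat) : Bool :=
  (pvCell board i j != "0") && (pvCell board i j == pvCell board i (j+1))
    && (pvCell board i j == pvCell board (i+1) j)
    && (pvCell board i j == pvCell board (i+1) (j+1))

-- ===== PORT A =====
def check (board : List (List String)) : Int :=
  let axis : List (Nat × Nat) :=
    (List.range (board.length - 1)).foldl (fun axis i =>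
      (List.range ((board.getD i []).length - 1)).foldl (fun axis j =>
        if pvHit board i j then
          axis ++ [(i, j), (i, j+1), (i+1, j), (i+1, j+1)]
        else axis) axis) []
  let newAxis : List (Nat × Nat) :=
    axis.foldl (fun newAxis p => if p ∈ newAxis then newAxis else newAxis ++ [p]) []
  -- (the Python then sets board[i][j] = '0' for each coordinate; mutation, not the return value)
  (newAxis.length : Int)

-- ===== PORT B =====
-- B's generator 'any(hit(a, b) for a in (i-1, i) if 0 <= a < n-1 for b in (j-1, j) if …)';
-- the candidates i-1, j-1 are Python ints and may be negative, so they are Int here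
def pvCovered (board : List (List String)) (i j : Nat) : Bool :=
  [(i : Int) - 1, (i : Int)].any (fun a =>
    decide (0 ≤ a ∧ a < (board.length : Int) - 1) &&
    [(j : Int) - 1, (j : Int)].any (fun b =>
      decide (0 ≤ b ∧ b < (((board.getD a.toNat []).length : Int) - 1)) &&
      pvHit board a.toNat b.toNat))

def check_alt (board : List (List String)) : Int :=
  let covered : List (Nat × Nat) :=
    (List.range board.length).flatMap (fun i =>
      ((List.range ((board.getD i []).length)).filter (fun j => pvCovered board i j)).map
        (fun j => (i, j)))
  -- (the Python then sets board[i][j] = '0' for each covered cell; mutation, not the return value)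
  (covered.length : Int)

-- ===== PRECONDITION & SPEC =====
-- Pre_ excludes exactly the ragged boards on which A raises IndexError (board[i+1][j] or
-- board[i+1][j+1] read past a shorter next row, reached only after the first two comparisons
-- of the short-circuited condition succeed); B's Python raises there too (it evaluates hit only
-- at pairs A evaluates), so no input on which A returns is excluded.
def Pre_check (board : List (List String)) : Prop :=
  ∀ i < board.length - 1, ∀ j < (board.getD i []).length - 1,
    (pvCell board i j ≠ "0" ∧ pvCell board i j = pvCell board i (j+1)) →
    (j + 1 < (board.getD (i+1) []).length ∨
     (j < (board.getD (i+1) []).length ∧ pvCell board (i+1) j ≠ pvCell board i j))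
instance (board : List (List String)) : Decidable (Pre_check board) := by
  unfold Pre_check; infer_instance

def pvWitness_check : List (List String) := [["1", "1", "2"], ["1", "1", "2"], ["0", "3", "3"]]

def Spec_check (board : List (List String)) (out : Int) : Prop := out = check_alt board
instance (board : List (List String)) (out : Int) : Decidable (Spec_check board out) := by unfold Spec_check; infer_instance

-- ===== CLAIM (what is proved, stated in full; the proofs are below) =====
def Claim_equal_check : Prop := ∀ (board : List (List String)), Dom_check board → Pre_check board → Spec_check board (check board)

-- ===== LEMMAS AND PROOFS =====

-- the four cells of the 2x2 block at p
def pvFour (p : Nat × Nat) : List (Nat × Nat) :=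
  [(p.1, p.2), (p.1, p.2 + 1), (p.1 + 1, p.2), (p.1 + 1, p.2 + 1)]

-- the flat list of (duplicated) coordinates A appends, in order
def pvL (board : List (List String)) : List (Nat × Nat) :=
  (List.range (board.length - 1)).flatMap (fun i =>
    (List.range ((board.getD i []).length - 1)).flatMap (fun j =>
      if pvHit board i j then pvFour (i, j) else []))

def pvInR (board : List (List String)) (p : Nat × Nat) : Prop :=
  p.1 < board.length ∧ p.2 < (board.getD p.1 []).length

def pvPositions (board : List (List String)) : List (Nat × Nat) :=
  (List.range board.length).flatMap (fun i =>
    (List.range ((board.getD i []).length)).map (fun j => (i, j)))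

theorem pv_mem_dedup (L : List (Nat × Nat)) :
    ∀ na q, (q ∈ L.foldl (fun na p => if p ∈ na then na else na ++ [p]) na ↔ q ∈ L ∨ q ∈ na) := by
  induction L with
  | nil => simp
  | cons p L ih =>
    intro na q
    rw [List.foldl_cons, ih]
    by_cases hp : p ∈ na <;> by_cases hq : q = p <;> simp [hp, hq]

theorem pv_nodup_dedup (L : List (Nat × Nat)) :
    ∀ na : List (Nat × Nat), na.Nodup →
      (L.foldl (fun na p => if p ∈ na then na else na ++ [p]) na).Nodup := by
  induction L with
  | nil => exact fun na h => h
  | cons p L ih =>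
    intro na h
    rw [List.foldl_cons]
    apply ih
    by_cases hp : p ∈ na
    · simpa [hp] using h
    · simp only [hp, if_false, List.nodup_append]
      exact ⟨h, List.nodup_singleton p, fun a ha b hb => by simp at hb; exact fun he => hp ((he.trans hb) ▸ ha)⟩

theorem pv_mem_positions (board : List (List String)) (q : Nat × Nat) :
    q ∈ pvPositions board ↔ pvInR board q := by
  unfold pvPositions pvInR
  simp only [List.mem_flatMap, List.mem_range, List.mem_map]
  constructor
  · rintro ⟨i, hi, j, hj, rfl⟩; exact ⟨hi, hj⟩
  · rintro ⟨h1, h2⟩; exact ⟨q.1, h1, q.2, h2, rfl⟩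

theorem pv_nodup_tagged (l : List Nat) (f : Nat → List (Nat × Nat))
    (hl : l.Nodup) (hf : ∀ i, (f i).Nodup) (ht : ∀ i p, p ∈ f i → p.1 = i) :
    (l.flatMap f).Nodup := by
  induction l with
  | nil => simp
  | cons a l ih =>
    rw [List.flatMap_cons, List.nodup_append]
    refine ⟨hf a, ih (List.Nodup.of_cons hl), fun p hp q hq => ?_⟩
    rw [List.mem_flatMap] at hq
    obtain ⟨i, hi, hqi⟩ := hq
    intro he
    subst he
    have h1 := ht a p hp
    have h2 := ht i p hqi
    exact (List.nodup_cons.mp hl).1 ((h1.symm.trans h2) ▸ hi)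

theorem pv_nodup_positions (board : List (List String)) : (pvPositions board).Nodup := by
  apply pv_nodup_tagged
  · exact List.nodup_range
  · intro i
    exact (List.nodup_range).map (fun a b h => (Prod.ext_iff.mp h).2)
  · intro i p hp
    simp only [List.mem_map, List.mem_range] at hp
    obtain ⟨j, _, rfl⟩ := hp
    rfl

theorem pv_mem_pvL_inR (board : List (List String)) (h : Pre_check board) :
    ∀ q ∈ pvL board, pvInR board q := by
  intro q hq
  unfold pvL at hq
  simp only [List.mem_flatMap, List.mem_range] at hq
  obtain ⟨i, hi, j, hj, hq⟩ := hq
  by_cases hh : pvHit board i j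
  swap
  · simp [hh] at hq
  rw [if_pos hh] at hq
  have hhit := hh
  unfold pvHit at hhit
  simp only [Bool.and_eq_true, bne_iff_ne, ne_eq, beq_iff_eq] at hhit
  obtain ⟨⟨⟨hne, he1⟩, he2⟩, he3⟩ := hhit
  have hlen : j + 1 < (board.getD (i+1) []).length := by
    rcases h i hi j hj ⟨hne, he1⟩ with h1 | ⟨_, h2⟩
    · exact h1
    · exact absurd he2.symm h2
  unfold pvInR
  simp only [pvFour, List.mem_cons, List.not_mem_nil, or_false] at hq
  rcases hq with rfl | rfl | rfl | rfl
  · exact ⟨show i < board.length by omega, show j < (board.getD i []).length by omega⟩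
  · exact ⟨show i < board.length by omega, show j + 1 < (board.getD i []).length by omega⟩
  · exact ⟨show i + 1 < board.length by omega, show j < (board.getD (i+1) []).length by omega⟩
  · exact ⟨show i + 1 < board.length by omega, show j + 1 < (board.getD (i+1) []).length by omega⟩

theorem pv_axis_eq (board : List (List String)) :
    ((List.range (board.length - 1)).foldl (fun axis i =>
      (List.range ((board.getD i []).length - 1)).foldl (fun axis j =>
        if pvHit board i j then
          axis ++ [(i, j), (i, j+1), (i+1, j), (i+1, j+1)]
        else axis) axis) ([] : List (Nat × Nat)))
    = pvL board := by
  have hfun : (fun (axis : List (Nat × Nat)) (i : Nat) =>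
      (List.range ((board.getD i []).length - 1)).foldl (fun axis j =>
        if pvHit board i j then
          axis ++ [(i, j), (i, j+1), (i+1, j), (i+1, j+1)]
        else axis) axis)
      = fun axis i => axis ++ (List.range ((board.getD i []).length - 1)).flatMap
          (fun j => if pvHit board i j then pvFour (i, j) else []) := by
    funext axis i
    have : (fun (axis : List (Nat × Nat)) (j : Nat) =>
        if pvHit board i j then
          axis ++ [(i, j), (i, j+1), (i+1, j), (i+1, j+1)]
        else axis)
        = fun axis j => axis ++ (if pvHit board i j then pvFour (i, j) else []) := by
      funext axis j
      cases pvHit board i j <;> simp [pvFour]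
    rw [this, PySem.List.foldl_append_eq_flatMap]
  rw [hfun, PySem.List.foldl_append_eq_flatMap, List.nil_append, pvL]

theorem pv_check_eq (board : List (List String)) :
    check board = ((pvL board).foldl
      (fun na p => if p ∈ na then na else na ++ [p]) []).length := by
  simp only [check]
  rw [pv_axis_eq]

-- membership in A's coordinate list, characterised by the generating block
theorem pv_mem_pvL (board : List (List String)) (i j : Nat) :
    (i, j) ∈ pvL board ↔ ∃ a b, a < board.length - 1 ∧ b < (board.getD a []).length - 1 ∧
      pvHit board a b = true ∧ (a = i ∨ a + 1 = i) ∧ (b = j ∨ b + 1 = j) := by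
  unfold pvL
  simp only [List.mem_flatMap, List.mem_range]
  constructor
  · rintro ⟨a, ha, b, hb, hm⟩
    by_cases hh : pvHit board a b
    swap
    · simp [hh] at hm
    rw [if_pos hh] at hm
    simp only [pvFour, List.mem_cons, List.not_mem_nil, or_false, Prod.mk.injEq] at hm
    exact ⟨a, b, ha, hb, hh, by omega⟩
  · rintro ⟨a, b, ha, hb, hh, hai, hbj⟩
    refine ⟨a, ha, b, hb, ?_⟩
    rw [if_pos hh]
    simp only [pvFour, List.mem_cons, List.not_mem_nil, or_false, Prod.mk.injEq]
    omega

-- B's per-cell predicate decides membership in A's coordinate list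
theorem pv_covered_iff (board : List (List String)) (i j : Nat) :
    pvCovered board i j = true ↔ (i, j) ∈ pvL board := by
  rw [pv_mem_pvL]
  unfold pvCovered
  simp only [List.any_cons, List.any_nil, Bool.or_false, Bool.and_eq_true,
    Bool.or_eq_true, decide_eq_true_eq]
  constructor
  · rintro (⟨ha, hrest⟩ | ⟨ha, hrest⟩) <;>
    · rcases hrest with ⟨hb, hh⟩ | ⟨hb, hh⟩ <;>
      · refine ⟨_, _, ?_, ?_, hh, ?_, ?_⟩ <;> omega
  · rintro ⟨a, b, ha, hb, hh, hai, hbj⟩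
    have hnn : ∀ m : Nat, ((m : Int)).toNat = m := fun m => by omega
    rcases hai with rfl | rfl
    · have e1 : ((a : Int)).toNat = a := hnn a
      rcases hbj with rfl | rfl
      · exact Or.inr ⟨by omega, Or.inr ⟨by rw [e1]; constructor <;> omega, by rw [e1, hnn]; exact hh⟩⟩
      · exact Or.inr ⟨by omega, Or.inl ⟨by rw [e1]; constructor <;> omega,
          by rw [e1, show ((↑(b+1) : Int) - 1).toNat = b by omega]; exact hh⟩⟩
    · have e1 : ((↑(a+1) : Int) - 1).toNat = a := by omega
      rcases hbj with rfl | rfl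
      · exact Or.inl ⟨by omega, Or.inr ⟨by rw [e1]; constructor <;> omega, by rw [e1, hnn]; exact hh⟩⟩
      · exact Or.inl ⟨by omega, Or.inl ⟨by rw [e1]; constructor <;> omega,
          by rw [e1, show ((↑(b+1) : Int) - 1).toNat = b by omega]; exact hh⟩⟩

theorem pv_covered_eq (board : List (List String)) (i j : Nat) :
    pvCovered board i j = decide ((i, j) ∈ pvL board) := by
  by_cases h : (i, j) ∈ pvL board
  · simp [h, (pv_covered_iff board i j).mpr h]
  · simp only [h, decide_false]
    by_contra hc
    exact h ((pv_covered_iff board i j).mp (by revert hc; cases pvCovered board i j <;> simp))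

theorem pv_check_alt_eq (board : List (List String)) :
    check_alt board = ((pvPositions board).filter (fun q => decide (q ∈ pvL board))).length := by
  simp only [check_alt]
  congr 1
  unfold pvPositions
  rw [List.filter_flatMap]
  refine congrArg List.length ?_
  refine congrFun (congrArg List.flatMap (funext fun i => ?_)) _
  rw [List.filter_map]
  refine congrArg _ (congrFun (congrArg List.filter (funext fun j => ?_)) _)
  simp only [Function.comp_apply]
  exact pv_covered_eq board i j

-- ===== VERDICT (by name: the statement is the Claim_ definition above) =====
theorem check_spec : Claim_equal_check := by
  intro board _ hpre
  unfold Spec_check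
  rw [pv_check_eq, pv_check_alt_eq board]
  have h1 : (((pvL board).foldl (fun na p => if p ∈ na then na else na ++ [p]) []) :
      List (Nat × Nat)).Perm ((pvPositions board).filter (fun q => decide (q ∈ pvL board))) := by
    apply (List.perm_ext_iff_of_nodup (pv_nodup_dedup _ _ List.nodup_nil)
      ((pv_nodup_positions board).filter _)).mpr
    intro q
    rw [pv_mem_dedup, List.mem_filter, pv_mem_positions]
    simp only [List.not_mem_nil, or_false, decide_eq_true_eq]
    exact ⟨fun hq => ⟨pv_mem_pvL_inR board hpre q hq, hq⟩, fun hq => hq.2⟩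
  exact_mod_cast h1.length_eq
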